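-- pv_equiv track=rewrite | github.com/pablosgs/SAT-solver | experimentprogram.py | jeroslow
-- ===== SOURCE A (Python) =====
-- def jeroslow(formula):
--     dict = {}
--     for clause in formula:
--         for literal in clause:
--             if literal in dict:
--                 dict[literal] += 2^(-abs(len(clause)))
--             else:
--                 dict[literal] = 2^(-abs(len(clause)))
--     dict = sorted(dict.items(), key=lambda x: x[1], reverse=True)
--     return dict[0][0]
-- ===== SOURCE B (Python) =====
-- def jeroslow(formula):
--     # Build distinct literals in first-seen order, then score each by a full
--     # scan of the formula; keep the first literal with the strictly greatest score.
--     seen = []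
--     for clause in formula:
--         for literal in clause:
--             if literal not in seen:
--                 seen.append(literal)
--     best = None
--     best_score = None
--     for literal in seen:
--         score = sum(c.count(literal) * (2 ^ (-abs(len(c)))) for c in formula)
--         if best is None or score > best_score:
--             best, best_score = literal, score
--     return best
-- ===== Notes on version B (the rewrite author's own statement) =====
-- stated objective: alternative
-- what changed: Instead of accumulating per-literal weights in a dict and stable-reverse-sorting its items, B collects the distinct literals in first-seen order and rescores each one by a full rescan of the formula, keeping a running best updated only on strict improvement (so the first-seen literal wins ties); no dict and no sort.
import Mathlib
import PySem

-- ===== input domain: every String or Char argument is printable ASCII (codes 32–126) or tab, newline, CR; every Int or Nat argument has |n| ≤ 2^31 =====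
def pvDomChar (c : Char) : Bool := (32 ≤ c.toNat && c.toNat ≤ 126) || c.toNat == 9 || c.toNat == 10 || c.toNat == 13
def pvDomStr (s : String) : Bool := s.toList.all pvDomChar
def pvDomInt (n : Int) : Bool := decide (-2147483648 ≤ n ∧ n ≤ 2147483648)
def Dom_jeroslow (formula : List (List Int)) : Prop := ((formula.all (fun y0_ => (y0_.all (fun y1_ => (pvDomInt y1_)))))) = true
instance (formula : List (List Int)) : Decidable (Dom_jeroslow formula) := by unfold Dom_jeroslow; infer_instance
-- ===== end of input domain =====

-- B replaces A's dict-accumulate-then-stable-reverse-sort with a first-seen scan of distinct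
-- literals rescored by full passes over the formula (alternative decomposition, not claimed faster).

-- ===== PORT A =====
-- the per-occurrence weight both Pythons write inline: 2^(-abs(len(clause))) — bitwise XOR, PySem.Int.bxor
def pvWt (c : List Int) : Int := PySem.Int.bxor 2 (-|(c.length : Int)|)

def jeroslow (formula : List (List Int)) : Int :=
  let d := formula.foldl (fun d clause =>
    clause.foldl (fun d literal =>
      match PySem.Dict.get? d literal with
      | some v => PySem.Dict.insert d literal (v + pvWt clause)
      | none   => PySem.Dict.insert d literal (pvWt clause)) d)
    PySem.Dict.empty
  let s := PySem.List.sorted d.items (fun x => x.2) true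
  -- dict[0][0]: IndexError when there are no literals — excluded by Pre_jeroslow
  ((PySem.List.pyGet? s 0).getD (0, 0)).1

-- ===== PORT B =====
def jeroslow_alt (formula : List (List Int)) : Int :=
  let seen := formula.foldl (fun s clause =>
    clause.foldl (fun s literal => if s.contains literal then s else s ++ [literal]) s) []
  let best := seen.foldl (fun acc literal =>
    let score := (formula.map (fun c =>
      (PySem.List.count c literal : Int) * pvWt c)).sum
    match acc with
    | none => some (literal, score)
    | some (_b, bs) => if bs < score then some (literal, score) else acc) none
  match best with
  | some (l, _) => l
  | none => 0    -- unreachable inside Pre_jeroslow (Python A raises, B returns None there)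

-- ===== PRECONDITION & SPEC =====
-- Pre_ excludes exactly the formulas with no literal at all, on which Python A raises IndexError.
def Pre_jeroslow (formula : List (List Int)) : Prop := formula.flatten ≠ []
instance (formula : List (List Int)) : Decidable (Pre_jeroslow formula) := by unfold Pre_jeroslow; infer_instance
def pvWitness_jeroslow : List (List Int) := [[1, -2], [2]]
def Spec_jeroslow (formula : List (List Int)) (out : Int) : Prop := out = jeroslow_alt formula
instance (formula : List (List Int)) (out : Int) : Decidable (Spec_jeroslow formula out) := by unfold Spec_jeroslow; infer_instance

-- ===== CLAIM (what is proved, stated in full; the proofs are below) =====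
def Claim_equal_jeroslow : Prop := ∀ (formula : List (List Int)), Dom_jeroslow formula → Pre_jeroslow formula → Spec_jeroslow formula (jeroslow formula)

-- ===== LEMMAS AND PROOFS =====

-- the stream of (literal, weight-of-its-clause) pairs both nested loops traverse
def pvPairs (formula : List (List Int)) : List (Int × Int) :=
  formula.flatMap (fun c => c.map (fun l => (l, pvWt c)))

-- pointwise function update
def pvUpd (σ : Int → Int) (k : Int) (v : Int) : Int → Int :=
  fun x => if x = k then v else σ x

-- A's dict step, on the (literal, weight) stream
def pvStep (d : PySem.Dict Int Int) (p : Int × Int) : PySem.Dict Int Int :=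
  match PySem.Dict.get? d p.1 with
  | some v => PySem.Dict.insert d p.1 (v + p.2)
  | none   => PySem.Dict.insert d p.1 p.2

-- B's running-best step ("first strict maximum by snd")
def pvFm (o : Option (Int × Int)) (p : Int × Int) : Option (Int × Int) :=
  match o with
  | none => some p
  | some y => if y.2 < p.2 then some p else o

lemma pv_nested_eq_pairs {β : Type} (formula : List (List Int)) (g : β → Int → Int → β) (b : β) :
    formula.foldl (fun d c => c.foldl (fun d l => g d l (pvWt c)) d) b
      = (pvPairs formula).foldl (fun d p => g d p.1 p.2) b := by
  induction formula generalizing b with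
  | nil => rfl
  | cons c rest ih =>
      simp only [List.foldl_cons, pvPairs, List.flatMap_cons, List.foldl_append, List.foldl_map]
      exact ih _

lemma pv_find_map (S : List Int) (σ : Int → Int) (k : Int) :
    (S.map (fun l => (l, σ l))).find? (fun p => p.1 == k)
      = if k ∈ S then some (k, σ k) else none := by
  induction S with
  | nil => simp
  | cons a t ih =>
      by_cases h : a = k
      · subst h; simp
      · simp [h, ih, Ne.symm h]

lemma pv_contains_map (S : List Int) (σ : Int → Int) (k : Int) :
    ((S.map (fun l => (l, σ l))).any fun p => p.1 == k) = S.contains k := by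
  induction S with
  | nil => simp
  | cons a t ih =>
      by_cases h : a = k
      · subst h; simp
      · simp [ih, h, Ne.symm h]

lemma pv_get_map (S : List Int) (σ : Int → Int) (k : Int) :
    PySem.Dict.get? (⟨S.map (fun l => (l, σ l))⟩ : PySem.Dict Int Int) k
      = if k ∈ S then some (σ k) else none := by
  show Option.map _ _ = _
  rw [pv_find_map]
  by_cases h : k ∈ S <;> simp [h]

lemma pv_fold_items :
    ∀ (P : List (Int × Int)) (S : List Int) (σ : Int → Int), S.Nodup →
      (∀ x, x ∉ S → σ x = 0) →
      (P.foldl pvStep ⟨S.map (fun l => (l, σ l))⟩).items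
        = (P.foldl (fun s p => if s.contains p.1 then s else s ++ [p.1]) S).map
            (fun l => (l, P.foldl (fun σ p => pvUpd σ p.1 (σ p.1 + p.2)) σ l)) := by
  intro P
  induction P with
  | nil => intro S σ _ _; rfl
  | cons p t ih =>
      intro S σ hnd h0
      obtain ⟨l, v⟩ := p
      by_cases hmem : l ∈ S
      · have hc : S.contains l = true := by simpa using hmem
        have hget : PySem.Dict.get? (⟨S.map (fun x => (x, σ x))⟩ : PySem.Dict Int Int) l = some (σ l) := by
          rw [pv_get_map]; exact if_pos hmem
        have hins : PySem.Dict.insert (⟨S.map (fun x => (x, σ x))⟩ : PySem.Dict Int Int) l (σ l + v)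
            = ⟨S.map (fun x => (x, pvUpd σ l (σ l + v) x))⟩ := by
          simp only [PySem.Dict.insert, PySem.Dict.contains, pv_contains_map]
          rw [if_pos (by simpa using hmem)]
          congr 1
          simp only [List.map_map]
          apply List.map_congr_left
          intro x _
          by_cases hx : x = l
          · subst hx; simp [pvUpd]
          · simp [Function.comp, hx, pvUpd]
        simp only [List.foldl_cons, pvStep, hget, hins, hc, if_true]
        rw [ih _ _ hnd]
        · intro x hx
          have : x ≠ l := fun h => hx (h ▸ hmem)
          simp [pvUpd, this, h0 x hx]
      · have hc : S.contains l = false := by simpa using hmem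
        have hget : PySem.Dict.get? (⟨S.map (fun x => (x, σ x))⟩ : PySem.Dict Int Int) l = none := by
          rw [pv_get_map]; exact if_neg hmem
        have hins : PySem.Dict.insert (⟨S.map (fun x => (x, σ x))⟩ : PySem.Dict Int Int) l v
            = ⟨(S ++ [l]).map (fun x => (x, pvUpd σ l (σ l + v) x))⟩ := by
          simp only [PySem.Dict.insert, PySem.Dict.contains, pv_contains_map]
          rw [if_neg (by simpa using hmem)]
          congr 1
          rw [List.map_append]
          congr 1
          · apply List.map_congr_left
            intro x hx
            have : x ≠ l := fun h => hmem (h ▸ hx)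
            simp [pvUpd, this]
          · simp [pvUpd, h0 l hmem]
        have hnd' : (S ++ [l]).Nodup := by
          simp only [List.nodup_append, List.nodup_singleton, true_and, hnd]
          exact fun a ha => by simp; exact fun h => hmem (h ▸ ha)
        simp only [List.foldl_cons, pvStep, hget, hins, hc, Bool.false_eq_true, if_false]
        rw [ih _ _ hnd']
        · intro x hx
          simp only [List.mem_append, List.mem_singleton, not_or] at hx
          simp [pvUpd, hx.2, h0 x hx.1]

-- the σ-fold computes σ plus the weight-sum of the pairs with this key
def pvCsum (P : List (Int × Int)) (l : Int) : Int :=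
  (P.map (fun p => if p.1 = l then p.2 else 0)).sum

lemma pv_sigma_fold :
    ∀ (P : List (Int × Int)) (σ : Int → Int) (l : Int),
      (P.foldl (fun σ p => pvUpd σ p.1 (σ p.1 + p.2)) σ) l = σ l + pvCsum P l := by
  intro P
  induction P with
  | nil => intro σ l; simp [pvCsum]
  | cons p t ih =>
      intro σ l
      obtain ⟨k, v⟩ := p
      simp only [List.foldl_cons, ih, pvCsum, List.map_cons, List.sum_cons, pvUpd]
      by_cases h : l = k
      · subst h; simp; ring
      · simp [h, Ne.symm h]

lemma pv_csum_clause (c : List Int) (wv l : Int) :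
    ((c.map (fun x => (x, wv))).map (fun p => if p.1 = l then p.2 else 0)).sum
      = (PySem.List.count c l : Int) * wv := by
  induction c with
  | nil => simp [PySem.List.count]
  | cons a t iht =>
      simp only [List.map_cons, List.sum_cons, iht]
      by_cases h : a = l
      · subst h
        simp [PySem.List.count]
        ring
      · simp [PySem.List.count, h]

lemma pv_csum_pairs (formula : List (List Int)) (l : Int) :
    pvCsum (pvPairs formula) l
      = (formula.map (fun c => (PySem.List.count c l : Int) * pvWt c)).sum := by
  induction formula with
  | nil => rfl
  | cons c rest ih =>
      simp only [pvPairs, List.flatMap_cons, pvCsum, List.map_append, List.sum_append,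
        List.map_cons, List.sum_cons] at *
      rw [ih, pv_csum_clause]

lemma pv_head_insertBy (x : Int × Int) (acc : List (Int × Int)) :
    (PySem.List.insertBy (fun a b => decide (b.2 < a.2)) x acc).head?
      = some (match acc with
              | [] => x
              | y :: _ => if y.2 < x.2 then x else y) := by
  cases acc with
  | nil => simp [PySem.List.insertBy]
  | cons y t =>
      by_cases h : y.2 < x.2 <;> simp [PySem.List.insertBy, h]

lemma pv_foldl_head :
    ∀ (ps : List (Int × Int)) (acc : List (Int × Int)),
      (ps.foldl (fun acc x => PySem.List.insertBy (fun a b => decide (b.2 < a.2)) x acc) acc).head?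
        = ps.foldl pvFm acc.head? := by
  intro ps
  induction ps with
  | nil => intro acc; rfl
  | cons x t ih =>
      intro acc
      simp only [List.foldl_cons, ih, pv_head_insertBy]
      congr 1
      cases acc with
      | nil => rfl
      | cons y r =>
          by_cases h : y.2 < x.2 <;> simp [pvFm, h]

lemma pv_pyGet?_zero (xs : List (Int × Int)) :
    PySem.List.pyGet? xs 0 = xs.head? := by
  cases xs <;> simp [PySem.List.pyGet?, PySem.List.pyIdx?]

lemma pv_match_getD (o : Option (Int × Int)) :
    (match o with | some (l, _) => l | none => 0) = (o.getD (0, 0)).1 := by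
  cases o with
  | none => rfl
  | some y => obtain ⟨a, b⟩ := y; rfl

-- ===== VERDICT (by name: the statement is the Claim_ definition above) =====
theorem jeroslow_spec : Claim_equal_jeroslow := by
  intro formula _ _
  unfold Spec_jeroslow jeroslow jeroslow_alt
  dsimp only
  rw [pv_nested_eq_pairs formula
        (fun d l v => match PySem.Dict.get? d l with
                      | some u => PySem.Dict.insert d l (u + v)
                      | none   => PySem.Dict.insert d l v) PySem.Dict.empty,
      pv_nested_eq_pairs formula
        (fun s l _ => if s.contains l then s else s ++ [l]) []]
  have hitems := pv_fold_items (pvPairs formula) [] (fun _ => 0) (by simp) (fun _ _ => rfl)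
  simp only [List.map_nil] at hitems
  have hstep :
      (List.foldl (fun d p =>
          match PySem.Dict.get? d p.1 with
          | some u => PySem.Dict.insert d p.1 (u + p.2)
          | none   => PySem.Dict.insert d p.1 p.2) (PySem.Dict.empty : PySem.Dict Int Int)
          (pvPairs formula))
        = List.foldl pvStep PySem.Dict.empty (pvPairs formula) := rfl
  rw [hstep, show (PySem.Dict.empty : PySem.Dict Int Int) = ⟨[]⟩ from rfl, hitems]
  rw [PySem.List.sorted_rev_eq_foldl_insertBy, pv_pyGet?_zero, pv_foldl_head]
  rw [List.foldl_map]
  have hscore : ∀ l : Int,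
      (List.foldl (fun σ p => pvUpd σ p.1 (σ p.1 + p.2)) (fun _ => (0:Int)) (pvPairs formula)) l
        = (formula.map (fun c => (PySem.List.count c l : Int) * pvWt c)).sum := by
    intro l
    rw [pv_sigma_fold, pv_csum_pairs]
    simp
  have hfun :
      (fun (o : Option (Int × Int)) (l : Int) =>
          pvFm o (l, (List.foldl (fun σ p => pvUpd σ p.1 (σ p.1 + p.2)) (fun _ => (0:Int))
            (pvPairs formula)) l))
        = (fun (o : Option (Int × Int)) (literal : Int) =>
            match o with
            | none => some (literal, (formula.map (fun c => (PySem.List.count c literal : Int) * pvWt c)).sum)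
            | some (b, bs) =>
              if bs < (formula.map (fun c => (PySem.List.count c literal : Int) * pvWt c)).sum then
                some (literal, (formula.map (fun c => (PySem.List.count c literal : Int) * pvWt c)).sum)
              else o) := by
    funext o l
    rw [show pvFm = (fun o p => match o with
          | none => some p
          | some y => if y.2 < p.2 then some p else o) from rfl]
    cases o with
    | none => simp [hscore]
    | some y => obtain ⟨b, bs⟩ := y; simp [hscore]
  rw [hfun]
  simp only [List.head?_nil]
  exact (pv_match_getD _).symm
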